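-- pv_equiv track=rewrite | github.com/leothaud/botDiscordModulable | treatMessage.py | argsCommand
-- ===== SOURCE A (Python) =====
-- def argsCommand(msg):
--     """
--         récupère les arguments d'une commande classique.
--     """
--     i = 0
--     while ( i < len(msg) and msg[i]!= " "):
--         i += 1
--     args = []
--     i += 1
--     k = i
--     while i < len(msg):
--         while (i < len(msg) and msg[i] != " "):
--             i += 1
--         args.append(msg[k:i])
--         i += 1
--         k = i
--     return args
-- ===== SOURCE B (Python) =====
-- def argsCommand(msg):
--     parts = msg.split(' ')
--     if len(parts) == 1:
--         return []
--     args = parts[1:]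
--     if args[-1] == '':
--         args.pop()
--     return args
-- ===== Notes on version B (the rewrite author's own statement) =====
-- stated objective: simpler
-- what changed: Replaced A's manual nested while-loop index scan with one library space-split, a slice dropping the command token, and a single pop of the trailing empty token produced by a trailing space.
import Mathlib
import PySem

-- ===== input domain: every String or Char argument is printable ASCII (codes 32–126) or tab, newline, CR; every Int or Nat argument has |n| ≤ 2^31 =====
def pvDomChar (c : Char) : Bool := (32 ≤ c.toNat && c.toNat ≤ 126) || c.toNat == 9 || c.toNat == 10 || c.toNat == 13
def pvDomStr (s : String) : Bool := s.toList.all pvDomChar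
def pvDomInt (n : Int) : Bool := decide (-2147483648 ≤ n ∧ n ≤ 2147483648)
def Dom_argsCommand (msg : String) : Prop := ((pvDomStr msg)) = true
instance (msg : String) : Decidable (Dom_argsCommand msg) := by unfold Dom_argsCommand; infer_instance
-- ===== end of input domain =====

-- B replaces A's manual nested while-loop index scan by one split(' '), a slice and one
-- conditional pop of the trailing empty token (objective: simpler).

-- ===== PORT A =====
-- while loop `while i < len(msg) and msg[i] != " ": i += 1` (returns the final i); used for
-- both the first loop and the identical inner loop of A
def aScan (l : List Char) (i : Nat) : Nat :=
  if h : i < l.length then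
    if l[i] ≠ ' ' then aScan l (i + 1) else i
  else i
termination_by l.length - i

-- aScan only moves forward (needed for the outer loop's termination)
theorem aScan_ge (l : List Char) (i : Nat) : i ≤ aScan l i := by
  rw [aScan]
  split
  · split
    · exact le_trans (Nat.le_succ i) (aScan_ge l (i + 1))
    · exact le_refl i
  · exact le_refl i
termination_by l.length - i

-- outer while loop: scan to next space, append msg[k:i] (= (drop k).take (i-k), exact since
-- 0 ≤ k ≤ i here), then skip the space
def aLoop (l : List Char) (i k : Nat) (args : List String) : List String :=
  if i < l.length then
    let i' := aScan l i
    aLoop l (i' + 1) (i' + 1) (args ++ [String.ofList ((l.drop k).take (i' - k))])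
  else args
termination_by l.length - i
decreasing_by have := aScan_ge l i; omega

def argsCommand (msg : String) : List String :=
  let l := msg.toList
  let i := aScan l 0        -- first loop: scan past the command token
  aLoop l (i + 1) (i + 1) []

-- ===== PORT B =====
def argsCommand_alt (msg : String) : List String :=
  let parts := (PySem.Str.split? msg " ").getD []   -- getD unreachable: the separator " " is non-empty
  if parts.length == 1 then []
  else
    let args := PySem.List.slice parts (some 1) none       -- parts[1:]
    if PySem.List.pyGet? args (-1) == some "" then args.dropLast   -- args[-1] == '' → args.pop()
    else args

-- ===== PRECONDITION & SPEC =====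
def Spec_argsCommand (msg : String) (out : List String) : Prop := out = argsCommand_alt msg
instance (msg : String) (out : List String) : Decidable (Spec_argsCommand msg out) := by unfold Spec_argsCommand; infer_instance

-- ===== CLAIM (what is proved, stated in full; the proofs are below) =====
def Claim_equal_argsCommand : Prop := ∀ (msg : String), Dom_argsCommand msg → Spec_argsCommand msg (argsCommand msg)

-- ===== LEMMAS AND PROOFS =====

-- span-based specification of Python's str.split(' ') over the char list
def pySplitSp : List Char → List (List Char)
  | [] => [[]]
  | c :: r => if c = ' ' then [] :: pySplitSp r else (pySplitSp r).modifyHead (c :: ·)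

theorem pySplitSp_ne_nil (l : List Char) : pySplitSp l ≠ [] := by
  cases l with
  | nil => simp [pySplitSp]
  | cons c r =>
    simp only [pySplitSp]
    split
    · simp
    · cases h : pySplitSp r with
      | nil => exact absurd h (pySplitSp_ne_nil r)
      | cons x xs => simp [List.modifyHead]

theorem splitOn_go_spec (fuel : Nat) (l cur : List Char) (acc : List (List Char))
    (hf : l.length ≤ fuel) :
    PySem.Chars.splitOn.go [' '] fuel l cur acc
      = acc.reverse ++ (pySplitSp l).modifyHead (cur.reverse ++ ·) := by
  induction fuel generalizing l cur acc with
  | zero =>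
    have : l = [] := by cases l <;> simp_all
    subst this
    simp [PySem.Chars.splitOn.go, pySplitSp]
  | succ fuel ih =>
    cases l with
    | nil => simp [PySem.Chars.splitOn.go, pySplitSp]
    | cons c rest =>
      rw [PySem.Chars.splitOn.go]
      by_cases hc : c = ' '
      · subst hc
        have hpre : [' '].isPrefixOf (' ' :: rest) = true := by simp [List.isPrefixOf]
        simp only [hpre, if_pos]
        have hdrop : List.drop [' '].length (' ' :: rest) = rest := rfl
        rw [hdrop, ih rest [] (cur.reverse :: acc) (by simp at hf; omega)]
        have hne := pySplitSp_ne_nil rest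
        cases h : pySplitSp rest with
        | nil => exact absurd h hne
        | cons x xs =>
          simp [pySplitSp, h, List.modifyHead]
      · have hpre : [' '].isPrefixOf (c :: rest) = false := by
          simp [List.isPrefixOf]
          intro h; exact absurd h.symm hc
        rw [if_neg (by simp [hpre])]
        rw [ih rest (c :: cur) acc (by simp at hf; omega)]
        have hne := pySplitSp_ne_nil rest
        cases h : pySplitSp rest with
        | nil => exact absurd h hne
        | cons x xs =>
          simp [pySplitSp, hc, h, List.modifyHead]

theorem splitOn_singleton (l : List Char) :
    PySem.Chars.splitOn l [' '] = pySplitSp l := by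
  unfold PySem.Chars.splitOn
  rw [splitOn_go_spec (l.length + 1) l [] [] (by omega)]
  have hne := pySplitSp_ne_nil l
  cases h : pySplitSp l with
  | nil => exact absurd h hne
  | cons x xs => simp [List.modifyHead]

theorem pySplitSp_no_space (t : List Char) (h : ' ' ∉ t) : pySplitSp t = [t] := by
  induction t with
  | nil => rfl
  | cons c r ih =>
    have hc : c ≠ ' ' := fun hc => h (by simp [hc])
    have hr : ' ' ∉ r := fun hr => h (by simp [hr])
    simp [pySplitSp, hc, ih hr, List.modifyHead]

theorem pySplitSp_append_space (t r : List Char) (h : ' ' ∉ t) :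
    pySplitSp (t ++ ' ' :: r) = t :: pySplitSp r := by
  induction t with
  | nil => simp [pySplitSp]
  | cons c t' ih =>
    have hc : c ≠ ' ' := fun hc => h (by simp [hc])
    have ht : ' ' ∉ t' := fun hr => h (by simp [hr])
    simp [pySplitSp, hc, ih ht, List.modifyHead]

theorem aScan_spec (l : List Char) (i : Nat) :
    aScan l i = i + ((l.drop i).takeWhile (· ≠ ' ')).length := by
  rw [aScan]
  by_cases h : i < l.length
  · rw [dif_pos h, List.drop_eq_getElem_cons h, List.takeWhile_cons]
    by_cases hc : l[i] = ' '
    · rw [if_neg (by simp [hc])]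
      simp [hc]
    · rw [if_pos (by simp [hc]), aScan_spec l (i + 1)]
      simp [hc]
      omega
  · rw [dif_neg h, List.drop_eq_nil_of_le (by omega)]
    simp
termination_by l.length - i

-- the value of A's outer loop, as a structural recursion over the remaining suffix
def tokens (s : List Char) : List String :=
  if hs : s = [] then []
  else String.ofList (s.takeWhile (· ≠ ' '))
        :: tokens (s.drop ((s.takeWhile (· ≠ ' ')).length + 1))
termination_by s.length
decreasing_by
  have : 0 < s.length := List.length_pos_of_ne_nil hs
  simp only [List.length_drop]
  omega

theorem aLoop_spec (l : List Char) (i : Nat) (args : List String) :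
    aLoop l i i args = args ++ tokens (l.drop i) := by
  rw [aLoop]
  split
  · rename_i h
    have hs : l.drop i ≠ [] := by
      intro hnil
      have := congrArg List.length hnil
      simp at this
      omega
    rw [tokens, dif_neg hs]
    have hscan := aScan_spec l i
    set t := (l.drop i).takeWhile (· ≠ ' ') with ht
    have htp : (l.drop i).take t.length = t := by
      have hpre : t <+: l.drop i := List.takeWhile_prefix _
      exact (List.prefix_iff_eq_take.mp hpre).symm
    have hge := aScan_ge l i
    rw [aLoop_spec l (aScan l i + 1)]
    have h1 : aScan l i - i = t.length := by omega
    have h2 : l.drop (aScan l i + 1) = (l.drop i).drop (t.length + 1) := by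
      rw [List.drop_drop]; congr 1; omega
    rw [h1, htp, h2, List.append_assoc, List.singleton_append]
  · rename_i h
    rw [List.drop_eq_nil_of_le (by omega), tokens]
    simp
termination_by l.length - i
decreasing_by have := aScan_ge l i; omega

-- decomposition of a string containing a space at its first space
theorem space_split (r : List Char) (hsp : ' ' ∈ r) :
    ∃ r', r = r.takeWhile (· ≠ ' ') ++ ' ' :: r' ∧ ' ' ∉ r.takeWhile (· ≠ ' ') := by
  have hnt : ' ' ∉ r.takeWhile (· ≠ ' ') := by
    intro hm
    have := List.mem_takeWhile_imp hm
    simp at this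
  have hdW : r.dropWhile (· ≠ ' ') ≠ [] := by
    intro hnil
    rw [List.dropWhile_eq_nil_iff] at hnil
    have := hnil _ hsp
    simp at this
  obtain ⟨c, r', hd⟩ := List.exists_cons_of_ne_nil hdW
  have hc : c = ' ' := by
    have hh := List.head_dropWhile_not (p := fun x => decide (x ≠ ' ')) hdW
    simp only [hd, List.head_cons] at hh
    simpa using hh
  subst hc
  refine ⟨r', ?_, hnt⟩
  rw [← hd]
  exact (List.takeWhile_append_dropWhile (p := fun x => decide (x ≠ ' ')) (l := r)).symm

-- B's trailing-empty pop applied to the mapped split pieces equals A's token loop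
theorem tokens_eq_pop (r : List Char) :
    tokens r =
      (if ((pySplitSp r).map String.ofList).getLast? = some "" then
        ((pySplitSp r).map String.ofList).dropLast
       else (pySplitSp r).map String.ofList) := by
  induction hn : r.length using Nat.strong_induction_on generalizing r with
  | _ n ih =>
  by_cases hsp : ' ' ∈ r
  · obtain ⟨r', hr, hnt⟩ := space_split r hsp
    set t := r.takeWhile (· ≠ ' ') with htdef
    have hrne : r ≠ [] := by rw [hr]; simp
    have hdrop : r.drop (t.length + 1) = r' := by
      rw [hr, show t.length + 1 = (t ++ [' ']).length by simp,
          show t ++ ' ' :: r' = (t ++ [' ']) ++ r' by simp, List.drop_left]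
    have hsplit : pySplitSp r = t :: pySplitSp r' := by
      rw [hr]; exact pySplitSp_append_space t r' hnt
    rw [tokens, dif_neg hrne, ← htdef, hdrop, hsplit, List.map_cons]
    rw [ih r'.length (by rw [← hn, hr]; simp only [List.length_append, List.length_cons]; omega) r' rfl]
    have hne : (pySplitSp r').map String.ofList ≠ [] := by
      simp [pySplitSp_ne_nil r']
    obtain ⟨x, xs, hx⟩ := List.exists_cons_of_ne_nil hne
    rw [hx]
    rw [List.getLast?_cons_cons]
    split <;> simp
  · have hsplit : pySplitSp r = [r] := pySplitSp_no_space r hsp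
    rw [hsplit]
    cases hr : r with
    | nil =>
      subst hr
      rw [tokens]
      simp
    | cons c rest =>
      rw [← hr]
      have hrne : r ≠ [] := by rw [hr]; simp
      have ht : r.takeWhile (· ≠ ' ') = r := by
        rw [List.takeWhile_eq_self_iff]
        intro a ha
        simp only [decide_eq_true_eq]
        intro h
        exact hsp (h ▸ ha)
      rw [tokens, dif_neg hrne, ht]
      rw [List.drop_eq_nil_of_le (by omega), tokens]
      have hne : String.ofList r ≠ "" := by
        intro h
        have : r = [] := by
          have := congrArg String.toList h
          simpa using this
        exact hrne this
      simp [List.getLast?, hne]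

-- ===== VERDICT (by name: the statement is the Claim_ definition above) =====
theorem argsCommand_spec : Claim_equal_argsCommand := by
  intro msg _
  unfold Spec_argsCommand argsCommand argsCommand_alt
  have hsep : (" " : String).toList = [' '] := rfl
  set l := msg.toList with hl
  have hparts : (PySem.Str.split? msg " ").getD [] = (pySplitSp l).map String.ofList := by
    simp only [PySem.Str.split?, PySem.Chars.split?, hsep]
    rw [if_neg (by simp), splitOn_singleton, ← hl]
    rfl
  rw [hparts]
  by_cases hsp : ' ' ∈ l
  · obtain ⟨r', hr, hnt⟩ := space_split l hsp
    set t := l.takeWhile (· ≠ ' ') with htdef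
    have hscan : aScan l 0 = t.length := by
      rw [aScan_spec, List.drop_zero, ← htdef]
      omega
    have hdrop : l.drop (t.length + 1) = r' := by
      rw [hr, show t.length + 1 = (t ++ [' ']).length by simp,
          show t ++ ' ' :: r' = (t ++ [' ']) ++ r' by simp, List.drop_left]
    have hsplit : pySplitSp l = t :: pySplitSp r' := by
      rw [hr]; exact pySplitSp_append_space t r' hnt
    rw [aLoop_spec l (aScan l 0 + 1) [], hscan, hdrop]
    rw [hsplit]
    have hne : pySplitSp r' ≠ [] := pySplitSp_ne_nil r'
    have hlen : ((t :: pySplitSp r').map String.ofList).length ≠ 1 := by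
      simp
      intro h
      exact hne h
    rw [if_neg (by simpa using hlen)]
    rw [tokens_eq_pop r']
    simp only [List.map_cons, PySem.List.slice_from_one, List.tail_cons,
               PySem.List.pyGet?_neg_one, List.nil_append]
    by_cases hcond : ((pySplitSp r').map String.ofList).getLast? = some ""
    · rw [if_pos hcond, if_pos (by simp [hcond])]
    · rw [if_neg hcond, if_neg (by simpa using hcond)]
  · have hsplit : pySplitSp l = [l] := pySplitSp_no_space l hsp
    have hscan : aScan l 0 = l.length := by
      have ht : l.takeWhile (· ≠ ' ') = l := by
        rw [List.takeWhile_eq_self_iff]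
        intro a ha
        simp only [decide_eq_true_eq]
        intro h
        exact hsp (h ▸ ha)
      rw [aScan_spec, List.drop_zero, ht]
      omega
    rw [aLoop_spec l (aScan l 0 + 1) [], hscan,
        List.drop_eq_nil_of_le (by omega), tokens]
    simp [hsplit]
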